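-- pv_equiv track=rewrite | github.com/Ahn-Hyun/kr-ship-write-be-v2 | scripts/auto_blog.py | _normalize_affected_lanes
-- ===== SOURCE A (Python) =====
-- MARKET_ANALYSIS_LANES = ("stocks", "real_estate")
--
-- def _ensure_list_of_strings(value) -> list[str]:
--     if not isinstance(value, list):
--         return []
--     items: list[str] = []
--     for item in value:
--         text = str(item).strip()
--         if text:
--             items.append(text)
--     return items
--
-- def _normalize_affected_lanes(value) -> list[str]:
--     normalized: list[str] = []
--     seen: set[str] = set()
--     raw_items = _ensure_list_of_strings(value)
--     for item in raw_items:
--         key = str(item).strip().lower().replace("-", "_").replace(" ", "_")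
--         if key in {"both", "all", "stocks_and_real_estate", "stock_and_real_estate"}:
--             for lane in MARKET_ANALYSIS_LANES:
--                 if lane not in seen:
--                     normalized.append(lane)
--                     seen.add(lane)
--             continue
--         if key == "real_estate" or key == "realestate":
--             key = "real_estate"
--         elif key in {"stock", "stocks"}:
--             key = "stocks"
--         if key in MARKET_ANALYSIS_LANES and key not in seen:
--             normalized.append(key)
--             seen.add(key)
--     return normalized
-- ===== SOURCE B (Python) =====
-- MARKET_ANALYSIS_LANES = ("stocks", "real_estate")
--
-- _BOTH_KEYS = ("both", "all", "stocks_and_real_estate", "stock_and_real_estate")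
--
--
-- def _triggers(lane):
--     if lane == "stocks":
--         return ("stock", "stocks") + _BOTH_KEYS
--     return ("real_estate", "realestate") + _BOTH_KEYS
--
--
-- def _first_trigger_index(keys, trig):
--     i = 0
--     for k in keys:
--         if k in trig:
--             return i
--         i += 1
--     return None
--
--
-- def _normalize_affected_lanes(value):
--     # For each canonical lane, find the index of the FIRST raw item that names it,
--     # then emit the lanes sorted by that first-occurrence index (stable for ties).
--     if not isinstance(value, list):
--         return []
--     keys = [str(item).strip().lower().replace("-", "_").replace(" ", "_") for item in value]
--     firsts = []
--     for lane in MARKET_ANALYSIS_LANES: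
--         idx = _first_trigger_index(keys, _triggers(lane))
--         if idx is not None:
--             firsts.append((idx, lane))
--     firsts.sort(key=lambda p: p[0])
--     return [lane for _, lane in firsts]
-- ===== Notes on version B (the rewrite author's own statement) =====
-- stated objective: alternative
-- what changed: Instead of A's single pass that appends lanes as triggers are encountered while maintaining a seen-set, B scans per canonical lane for the index of the first item that triggers it and then sorts the (index, lane) pairs by index to recover first-occurrence order; no seen-set or online dedup exists in B.
import Mathlib
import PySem

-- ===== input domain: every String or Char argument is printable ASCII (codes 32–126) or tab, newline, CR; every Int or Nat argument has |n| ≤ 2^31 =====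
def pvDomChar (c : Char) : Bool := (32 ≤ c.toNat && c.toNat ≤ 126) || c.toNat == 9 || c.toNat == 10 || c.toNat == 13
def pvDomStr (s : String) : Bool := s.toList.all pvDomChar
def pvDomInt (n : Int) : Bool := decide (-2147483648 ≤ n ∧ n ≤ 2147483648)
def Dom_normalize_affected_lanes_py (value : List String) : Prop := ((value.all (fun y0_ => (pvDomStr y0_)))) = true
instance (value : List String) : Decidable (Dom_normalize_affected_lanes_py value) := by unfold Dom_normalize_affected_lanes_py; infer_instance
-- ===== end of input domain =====

-- B replaces A's single stateful pass (append-on-first-encounter with a seen-set) by a per-lane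
-- first-trigger-index scan followed by a stable sort of the (index, lane) pairs; objective: alternative.

-- ===== PORT A =====
-- MARKET_ANALYSIS_LANES
def pvMarketLanes : List String := ["stocks", "real_estate"]

-- _ensure_list_of_strings (argument already a list of strings under the type convention)
def pvEnsureA (value : List String) : List String :=
  value.foldl (fun items item =>
    let text := PySem.Str.strip item
    if text ≠ "" then items ++ [text] else items) []

-- the body of A's for-loop: state = (normalized, seen)
def pvStepA (st : List String × PySem.Set String) (item : String) :
    List String × PySem.Set String :=
  let key := PySem.Str.replace (PySem.Str.replace (PySem.Str.lower (PySem.Str.strip item)) "-" "_") " " "_"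
  if key = "both" ∨ key = "all" ∨ key = "stocks_and_real_estate" ∨ key = "stock_and_real_estate" then
    pvMarketLanes.foldl
      (fun st2 lane =>
        if ¬ PySem.Set.contains st2.2 lane then (st2.1 ++ [lane], PySem.Set.add st2.2 lane)
        else st2)
      st
  else
    let key := if key = "real_estate" ∨ key = "realestate" then "real_estate"
      else if key = "stock" ∨ key = "stocks" then "stocks" else key
    if key ∈ pvMarketLanes ∧ ¬ PySem.Set.contains st.2 key then
      (st.1 ++ [key], PySem.Set.add st.2 key)
    else st

def normalize_affected_lanes_py (value : List String) : List String :=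
  ((pvEnsureA value).foldl pvStepA ([], PySem.Set.empty)).1

-- ===== PORT B =====
-- _BOTH_KEYS
def pvBothKeys : List String := ["both", "all", "stocks_and_real_estate", "stock_and_real_estate"]

-- _triggers
def pvTriggers (lane : String) : List String :=
  if lane = "stocks" then ["stock", "stocks"] ++ pvBothKeys
  else ["real_estate", "realestate"] ++ pvBothKeys

-- _first_trigger_index: the counting loop, counter i starts at 0
def pvFTIgo (trig : List String) (i : Int) : List String → Option Int
  | [] => none
  | k :: ks => if k ∈ trig then some i else pvFTIgo trig (i + 1) ks

def pvFirstTriggerIndex (keys trig : List String) : Option Int :=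
  pvFTIgo trig 0 keys

-- the key-normalization applied in B's comprehension
def pvKeyOf (item : String) : String :=
  PySem.Str.replace (PySem.Str.replace (PySem.Str.lower (PySem.Str.strip item)) "-" "_") " " "_"

def normalize_affected_lanes_py_alt (value : List String) : List String :=
  let keys := value.map pvKeyOf
  let firsts := pvMarketLanes.foldl
    (fun fs lane =>
      match pvFirstTriggerIndex keys (pvTriggers lane) with
      | some i => fs ++ [(i, lane)]
      | none => fs)
    ([] : List (Int × String))
  (PySem.List.sorted firsts (fun p => p.1) false).map (fun p => p.2)

-- ===== PRECONDITION & SPEC =====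
def Spec_normalize_affected_lanes_py (value : List String) (out : List String) : Prop := out = normalize_affected_lanes_py_alt value
instance (value : List String) (out : List String) : Decidable (Spec_normalize_affected_lanes_py value out) := by unfold Spec_normalize_affected_lanes_py; infer_instance

-- ===== CLAIM (what is proved, stated in full; the proofs are below) =====
def Claim_equal_normalize_affected_lanes_py : Prop := ∀ (value : List String), Dom_normalize_affected_lanes_py value → Spec_normalize_affected_lanes_py value (normalize_affected_lanes_py value)

-- ===== LEMMAS AND PROOFS =====

theorem pv_dw_idem {α : Type} (p : α → Bool) (l : List α) :
    (l.dropWhile p).dropWhile p = l.dropWhile p := by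
  induction l with
  | nil => rfl
  | cons x xs ih => by_cases h : p x <;> simp [h, ih]

theorem pv_dw_prefix {α : Type} (p : α → Bool) {v w : List α}
    (h : v.dropWhile p = v) (hw : w <+: v) : w.dropWhile p = w := by
  cases w with
  | nil => rfl
  | cons a t =>
    obtain ⟨r, hr⟩ := hw
    subst hr
    by_cases ha : p a
    · exfalso
      have hlen := (List.dropWhile_suffix (l := t ++ r) p).length_le
      rw [List.cons_append, List.dropWhile_cons, if_pos ha] at h
      rw [h] at hlen
      simp at hlen
    · simp [ha]

theorem pv_chars_strip_idem (l : List Char) :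
    PySem.Chars.strip (PySem.Chars.strip l) = PySem.Chars.strip l := by
  unfold PySem.Chars.strip PySem.Chars.rstrip PySem.Chars.lstrip
  set p := PySem.Chars.isspace
  set u := l.dropWhile p with hu
  have hu_self : u.dropWhile p = u := pv_dw_idem p l
  set s' := (u.reverse.dropWhile p).reverse with hs'
  have hpre : s' <+: u := by
    rw [hs']
    simpa using List.reverse_prefix.mpr (List.dropWhile_suffix (l := u.reverse) p)
  have h1 : s'.dropWhile p = s' := pv_dw_prefix p hu_self hpre
  rw [h1, hs', List.reverse_reverse, pv_dw_idem]

theorem pv_strip_idem (s : String) :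
    PySem.Str.strip (PySem.Str.strip s) = PySem.Str.strip s := by
  rw [← String.toList_inj]
  simp [pv_chars_strip_idem]

-- proof-level names for the inline step function of A's _ensure_list_of_strings port
def pvEnsStep (items : List String) (item : String) : List String :=
  let text := PySem.Str.strip item
  if text ≠ "" then items ++ [text] else items

def pvEnsF (item : String) : Option String :=
  let t := PySem.Str.strip item
  if t = "" then none else some t

theorem pv_ens_fold (l : List String) : ∀ acc, l.foldl pvEnsStep acc = acc ++ l.filterMap pvEnsF := by
  induction l with
  | nil => simp
  | cons x xs ih =>
    intro acc
    simp only [List.foldl_cons, List.filterMap_cons]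
    rw [ih]
    by_cases hx : PySem.Str.strip x = "" <;> simp [pvEnsStep, pvEnsF, hx]

-- canonical lane list a single item contributes (proof-side characterisation of A's branches)
def pvLanesFor (key : String) : List String :=
  if key = "both" ∨ key = "all" ∨ key = "stocks_and_real_estate" ∨ key = "stock_and_real_estate" then
    ["stocks", "real_estate"]
  else if key = "stock" ∨ key = "stocks" then ["stocks"]
  else if key = "real_estate" ∨ key = "realestate" then ["real_estate"]
  else []

def pvStep1 (st : List String × PySem.Set String) (lane : String) :
    List String × PySem.Set String :=
  if ¬ PySem.Set.contains st.2 lane then (st.1 ++ [lane], PySem.Set.add st.2 lane) else st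

theorem pv_stepA_eq (st : List String × PySem.Set String) (item : String) :
    pvStepA st item = (pvLanesFor (pvKeyOf item)).foldl pvStep1 st := by
  unfold pvStepA pvLanesFor pvKeyOf
  generalize (PySem.Str.replace (PySem.Str.replace (PySem.Str.lower (PySem.Str.strip item)) "-" "_") " " "_") = key
  by_cases h1 : key = "both" ∨ key = "all" ∨ key = "stocks_and_real_estate" ∨ key = "stock_and_real_estate"
  · rw [if_pos h1, if_pos h1]; rfl
  · rw [if_neg h1, if_neg h1]
    by_cases h2 : key = "real_estate" ∨ key = "realestate"
    · have hk : ¬ (key = "stock" ∨ key = "stocks") := by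
        rcases h2 with h | h <;> subst h <;> decide
      have hmem : ("real_estate" : String) ∈ pvMarketLanes := by decide
      simp only [if_pos h2, if_neg hk, List.foldl_cons, List.foldl_nil]
      simp [pvStep1, hmem]
    · by_cases h3 : key = "stock" ∨ key = "stocks"
      · have hmem : ("stocks" : String) ∈ pvMarketLanes := by decide
        simp only [if_neg h2, if_pos h3, List.foldl_cons, List.foldl_nil]
        simp [pvStep1, hmem]
      · have hmem : key ∉ pvMarketLanes := by
          intro hm
          rcases List.mem_cons.mp hm with h | h
          · exact h3 (Or.inr h)
          · exact h2 (Or.inl (List.mem_singleton.mp h))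
        simp only [if_neg h2, if_neg h3, List.foldl_nil]
        simp [hmem]

theorem pv_fold_main (l : List String) (st : List String × PySem.Set String) :
    l.foldl pvStepA st = (l.flatMap (fun i => pvLanesFor (pvKeyOf i))).foldl pvStep1 st := by
  induction l generalizing st with
  | nil => simp
  | cons x xs ih =>
    simp only [List.foldl_cons, List.flatMap_cons, List.foldl_append]
    rw [pv_stepA_eq]
    exact ih _

-- dropping blank items does not change the contributed lanes
theorem pv_flat_ensure (value : List String) :
    (pvEnsureA value).flatMap (fun i => pvLanesFor (pvKeyOf i)) =
      value.flatMap (fun i => pvLanesFor (pvKeyOf i)) := by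
  show (value.foldl pvEnsStep []).flatMap _ = _
  rw [pv_ens_fold value [], List.nil_append]
  induction value with
  | nil => rfl
  | cons x xs ih =>
    by_cases hx : PySem.Str.strip x = ""
    · have h1 : List.filterMap pvEnsF (x :: xs) = List.filterMap pvEnsF xs := by
        simp [pvEnsF, hx]
      have hkey : pvLanesFor (pvKeyOf x) = [] := by
        unfold pvKeyOf; rw [hx]; decide
      rw [h1, ih, List.flatMap_cons, hkey, List.nil_append]
    · have h1 : List.filterMap pvEnsF (x :: xs) = PySem.Str.strip x :: List.filterMap pvEnsF xs := by
        simp [pvEnsF, hx]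
      have hkey : pvKeyOf (PySem.Str.strip x) = pvKeyOf x := by
        unfold pvKeyOf; rw [pv_strip_idem]
      rw [h1, List.flatMap_cons, hkey, ih, List.flatMap_cons]

-- the two trigger predicates, and the decomposition of pvLanesFor along them
theorem pv_lanesFor_decomp (k : String) :
    pvLanesFor k = (if k ∈ pvTriggers "stocks" then ["stocks"] else []) ++
      (if k ∈ pvTriggers "real_estate" then ["real_estate"] else []) := by
  unfold pvLanesFor pvTriggers pvBothKeys
  by_cases h1 : k = "both" ∨ k = "all" ∨ k = "stocks_and_real_estate" ∨ k = "stock_and_real_estate"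
  · rcases h1 with h | h | h | h <;> subst h <;> decide
  · rw [if_neg h1]
    by_cases h2 : k = "stock" ∨ k = "stocks"
    · rcases h2 with h | h <;> subst h <;> decide
    · rw [if_neg h2]
      by_cases h3 : k = "real_estate" ∨ k = "realestate"
      · rcases h3 with h | h <;> subst h <;> decide
      · rw [if_neg h3]
        rw [if_neg (show ¬ k ∈ _ by simp; tauto), if_neg (show ¬ k ∈ _ by simp; tauto)]
        rfl

theorem pv_mem_lanesFor {x k : String} (h : x ∈ pvLanesFor k) :
    x = "stocks" ∨ x = "real_estate" := by
  rw [pv_lanesFor_decomp] at h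
  rcases List.mem_append.mp h with h | h <;> split at h <;> simp at h <;> tauto

theorem pv_mem_flat {x : String} {ks : List String} (h : x ∈ ks.flatMap pvLanesFor) :
    x = "stocks" ∨ x = "real_estate" := by
  rw [List.mem_flatMap] at h
  obtain ⟨k, _, hk⟩ := h
  exact pv_mem_lanesFor hk

theorem pv_s_mem_flat_iff (ks : List String) :
    ("stocks" ∈ ks.flatMap pvLanesFor) ↔ ∃ k ∈ ks, k ∈ pvTriggers "stocks" := by
  rw [List.mem_flatMap]
  constructor
  · rintro ⟨k, hks, hk⟩
    refine ⟨k, hks, ?_⟩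
    rw [pv_lanesFor_decomp] at hk
    rcases List.mem_append.mp hk with h | h <;> split at h <;> simp at h
    · assumption
  · rintro ⟨k, hks, hk⟩
    refine ⟨k, hks, ?_⟩
    rw [pv_lanesFor_decomp, if_pos hk]
    simp
theorem pv_r_mem_flat_iff (ks : List String) :
    ("real_estate" ∈ ks.flatMap pvLanesFor) ↔ ∃ k ∈ ks, k ∈ pvTriggers "real_estate" := by
  rw [List.mem_flatMap]
  constructor
  · rintro ⟨k, hks, hk⟩
    refine ⟨k, hks, ?_⟩
    rw [pv_lanesFor_decomp] at hk
    rcases List.mem_append.mp hk with h | h <;> split at h <;> simp at h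
    · assumption
  · rintro ⟨k, hks, hk⟩
    refine ⟨k, hks, ?_⟩
    rw [pv_lanesFor_decomp, if_pos hk]
    simp

-- pvNew: the trace of new elements A's online dedup appends
def pvNew (s : PySem.Set String) : List String → List String
  | [] => []
  | x :: xs =>
    if PySem.Set.contains s x then pvNew s xs else x :: pvNew (s ++ [x]) xs

theorem pv_fold1 (l : List String) (n : List String) (s : PySem.Set String) :
    l.foldl pvStep1 (n, s) = (n ++ pvNew s l, s ++ pvNew s l) := by
  induction l generalizing n s with
  | nil => simp [pvNew]
  | cons x xs ih =>
    by_cases h : x ∈ s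
    · simp [List.foldl_cons, pvStep1, pvNew, h, ih]
    · simp only [List.foldl_cons, pvStep1, pvNew]
      rw [if_pos, if_neg, PySem.Set.add, if_neg]
      · rw [ih]; simp
      · simpa using h
      · simpa using h
      · simpa using h

-- FTI facts
theorem pvFTIgo_cons (trig : List String) (i : Int) (k : String) (ks : List String) :
    pvFTIgo trig i (k :: ks) = if k ∈ trig then some i else pvFTIgo trig (i + 1) ks := rfl

theorem pv_ftigo_none_iff (trig ks : List String) : ∀ i,
    pvFTIgo trig i ks = none ↔ ∀ k ∈ ks, k ∉ trig := by
  induction ks with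
  | nil => simp [pvFTIgo]
  | cons k ks ih =>
    intro i
    by_cases h : k ∈ trig <;> simp [pvFTIgo_cons, h, ih]

theorem pv_ftigo_le (trig : List String) : ∀ (ks : List String) (i j : Int),
    pvFTIgo trig i ks = some j → i ≤ j := by
  intro ks
  induction ks with
  | nil => intro i j h; simp [pvFTIgo] at h
  | cons k ks ih =>
    intro i j h
    rw [pvFTIgo_cons] at h
    by_cases hk : k ∈ trig
    · rw [if_pos hk] at h; injection h with h; omega
    · rw [if_neg hk] at h
      have := ih (i + 1) j h
      omega

-- the emission B's sort produces, as a function of the two first-trigger indices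
def pvEmit : Option Int → Option Int → List String
  | none, none => []
  | some _, none => ["stocks"]
  | none, some _ => ["real_estate"]
  | some i, some j => if j < i then ["real_estate", "stocks"] else ["stocks", "real_estate"]

theorem pv_alt_closed (value : List String) :
    normalize_affected_lanes_py_alt value =
      pvEmit (pvFTIgo (pvTriggers "stocks") 0 (value.map pvKeyOf))
             (pvFTIgo (pvTriggers "real_estate") 0 (value.map pvKeyOf)) := by
  simp only [normalize_affected_lanes_py_alt, pvFirstTriggerIndex, pvMarketLanes,
    List.foldl_cons, List.foldl_nil]
  cases hs : pvFTIgo (pvTriggers "stocks") 0 (value.map pvKeyOf) with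
  | none =>
    cases hr : pvFTIgo (pvTriggers "real_estate") 0 (value.map pvKeyOf) with
    | none => simp [pvEmit, PySem.List.sorted_eq_nil_iff]
    | some j =>
      simp only [pvEmit, List.nil_append]
      rw [show (PySem.List.sorted [(j, "real_estate")] (fun p => p.1) false) = [(j, "real_estate")] from
        PySem.List.sorted_eq_self_of_pairwise _ _ (by simp)]
      rfl
  | some i =>
    cases hr : pvFTIgo (pvTriggers "real_estate") 0 (value.map pvKeyOf) with
    | none =>
      simp only [pvEmit, List.nil_append]
      rw [show (PySem.List.sorted [(i, "stocks")] (fun p => p.1) false) = [(i, "stocks")] from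
        PySem.List.sorted_eq_self_of_pairwise _ _ (by simp)]
      rfl
    | some j =>
      simp only [pvEmit, List.cons_append, List.nil_append]
      by_cases hij : j < i
      · rw [if_pos hij,
          show (PySem.List.sorted [(i, "stocks"), (j, "real_estate")] (fun p => p.1) false)
              = [(j, "real_estate"), (i, "stocks")] from
            PySem.List.sorted_eq_of_perm_of_pairwise_lt _ _ _
              (List.Perm.swap (i, "stocks") (j, "real_estate") []) (by simpa using hij)]
        rfl
      · rw [if_neg hij,
          show (PySem.List.sorted [(i, "stocks"), (j, "real_estate")] (fun p => p.1) false)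
              = [(i, "stocks"), (j, "real_estate")] from
            PySem.List.sorted_eq_self_of_pairwise _ _ (by simp; omega)]
        rfl

-- dedup-trace helper lemmas over the two-lane alphabet
theorem pvNew_cons (s : PySem.Set String) (x : String) (xs : List String) :
    pvNew s (x :: xs) =
      if PySem.Set.contains s x then pvNew s xs else x :: pvNew (s ++ [x]) xs := rfl

theorem pv_new_all_seen (l : List String) : ∀ (s : PySem.Set String),
    (∀ x ∈ l, x ∈ s) → pvNew s l = [] := by
  induction l with
  | nil => intro s _; rfl
  | cons x xs ih =>
    intro s h
    have hx : x ∈ s := h x (by simp)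
    rw [pvNew_cons, if_pos (by simpa using hx)]
    exact ih s (fun y hy => h y (by simp [hy]))

theorem pv_new_s (l : List String) (hl : ∀ x ∈ l, x = "stocks" ∨ x = "real_estate") :
    pvNew (PySem.Set.empty ++ ["stocks"]) l =
      if "real_estate" ∈ l then ["real_estate"] else [] := by
  induction l with
  | nil => rfl
  | cons x xs ih =>
    have ih' := ih (fun y hy => hl y (by simp [hy]))
    rcases hl x (by simp) with hx | hx <;> subst hx
    · rw [pvNew_cons, if_pos (by decide), ih']
      by_cases hb : "real_estate" ∈ xs <;> simp [hb]
    · rw [pvNew_cons, if_neg (by decide),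
        pv_new_all_seen _ _ (fun y hy => by
          rcases hl y (by simp [hy]) with h | h <;> subst h <;> decide)]
      simp

theorem pv_new_r (l : List String) (hl : ∀ x ∈ l, x = "stocks" ∨ x = "real_estate") :
    pvNew (PySem.Set.empty ++ ["real_estate"]) l =
      if "stocks" ∈ l then ["stocks"] else [] := by
  induction l with
  | nil => rfl
  | cons x xs ih =>
    have ih' := ih (fun y hy => hl y (by simp [hy]))
    rcases hl x (by simp) with hx | hx <;> subst hx
    · rw [pvNew_cons, if_neg (by decide),
        pv_new_all_seen _ _ (fun y hy => by
          rcases hl y (by simp [hy]) with h | h <;> subst h <;> decide)]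
      simp
    · rw [pvNew_cons, if_pos (by decide), ih']
      by_cases hb : "stocks" ∈ xs <;> simp [hb]

-- the main induction: A's dedup trace equals B's index-ordered emission
theorem pv_main (ks : List String) : ∀ (n : Int),
    pvNew PySem.Set.empty (ks.flatMap pvLanesFor) =
      pvEmit (pvFTIgo (pvTriggers "stocks") n ks) (pvFTIgo (pvTriggers "real_estate") n ks) := by
  induction ks with
  | nil => intro n; rfl
  | cons k ks ih =>
    intro n
    have hmem : ∀ x ∈ ks.flatMap pvLanesFor, x = "stocks" ∨ x = "real_estate" :=
      fun x hx => pv_mem_flat hx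
    rw [List.flatMap_cons, pv_lanesFor_decomp k]
    by_cases hs : k ∈ pvTriggers "stocks" <;> by_cases hr : k ∈ pvTriggers "real_estate" <;>
      rw [pvFTIgo_cons, pvFTIgo_cons]
    · -- both lanes triggered
      rw [if_pos hs, if_pos hr, if_pos hs, if_pos hr]
      simp only [List.cons_append, List.nil_append]
      rw [pvNew_cons, if_neg (by decide), pvNew_cons, if_neg (by decide),
        pv_new_all_seen _ _ (fun y hy => by
          rcases hmem y hy with h | h <;> subst h <;> decide)]
      simp [pvEmit]
    · -- stocks only
      rw [if_pos hs, if_neg hr, if_pos hs, if_neg hr]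
      simp only [List.cons_append, List.nil_append]
      rw [pvNew_cons, if_neg (by decide), pv_new_s _ hmem]
      cases hb : pvFTIgo (pvTriggers "real_estate") (n + 1) ks with
      | none =>
        have hnr : "real_estate" ∉ ks.flatMap pvLanesFor := by
          rw [pv_r_mem_flat_iff]
          rintro ⟨k', hk', ht⟩
          exact ((pv_ftigo_none_iff _ _ (n + 1)).mp hb k' hk') ht
        simp [pvEmit, hnr]
      | some j =>
        have hjn : n + 1 ≤ j := pv_ftigo_le _ _ _ _ hb
        have hyr : "real_estate" ∈ ks.flatMap pvLanesFor := by
          rw [pv_r_mem_flat_iff]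
          by_contra hc
          rw [(pv_ftigo_none_iff _ _ (n + 1)).mpr (fun k hk ht => hc ⟨k, hk, ht⟩)] at hb
          cases hb
        simp [pvEmit, hyr, show ¬ j < n by omega]
    · -- real_estate only
      rw [if_neg hs, if_pos hr, if_neg hs, if_pos hr]
      simp only [List.cons_append, List.nil_append]
      rw [pvNew_cons, if_neg (by decide), pv_new_r _ hmem]
      cases hb : pvFTIgo (pvTriggers "stocks") (n + 1) ks with
      | none =>
        have hns : "stocks" ∉ ks.flatMap pvLanesFor := by
          rw [pv_s_mem_flat_iff]
          rintro ⟨k', hk', ht⟩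
          exact ((pv_ftigo_none_iff _ _ (n + 1)).mp hb k' hk') ht
        simp [pvEmit, hns]
      | some i =>
        have hin : n + 1 ≤ i := pv_ftigo_le _ _ _ _ hb
        have hys : "stocks" ∈ ks.flatMap pvLanesFor := by
          rw [pv_s_mem_flat_iff]
          by_contra hc
          rw [(pv_ftigo_none_iff _ _ (n + 1)).mpr (fun k hk ht => hc ⟨k, hk, ht⟩)] at hb
          cases hb
        simp [pvEmit, hys, show n < i by omega]
    · -- neither
      rw [if_neg hs, if_neg hr, if_neg hs, if_neg hr]
      simp only [List.nil_append]
      exact ih (n + 1)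

-- ===== VERDICT (by name: the statement is the Claim_ definition above) =====
theorem normalize_affected_lanes_py_spec : Claim_equal_normalize_affected_lanes_py := by
  intro value _
  unfold Spec_normalize_affected_lanes_py normalize_affected_lanes_py
  rw [pv_fold_main, pv_flat_ensure, pv_alt_closed]
  have hflat : value.flatMap (fun i => pvLanesFor (pvKeyOf i)) = (value.map pvKeyOf).flatMap pvLanesFor := by
    rw [List.flatMap_map]
  rw [hflat]
  show (_ : List String × PySem.Set String).1 = _
  rw [pv_fold1, List.nil_append]
  exact pv_main (value.map pvKeyOf) 0
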